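-- pv_equiv track=rewrite | github.com/mondweep/AIJobSearch | job_search_ai/utils/profile_analyzer.py | _identify_development_areas
-- ===== SOURCE A (Python) =====
-- def _identify_development_areas(current_skills):
--     """Identify areas for skill development"""
--     core_areas = {
--         'Technical': ['cloud', 'aws', 'azure', 'python'],
--         'Leadership': ['management', 'leadership', 'strategy'],
--         'Domain': ['architecture', 'security', 'agile']
--     }
--
--     development_areas = []
--     current_skills_lower = {skill.lower() for skill in current_skills}
--
--     for area, required_skills in core_areas.items():
--         if not any(skill in current_skills_lower for skill in required_skills):
--             development_areas.append(area)
--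
--     return development_areas
-- ===== SOURCE B (Python) =====
-- def _identify_development_areas(current_skills):
--     """Identify areas for skill development"""
--     core_areas = {
--         'Technical': ['cloud', 'aws', 'azure', 'python'],
--         'Leadership': ['management', 'leadership', 'strategy'],
--         'Domain': ['architecture', 'security', 'agile']
--     }
--     skill_to_area = {skill: area for area, skills in core_areas.items() for skill in skills}
--     covered = set()
--     for skill in current_skills:
--         area = skill_to_area.get(skill.lower())
--         if area is not None:
--             covered.add(area)
--     return [area for area in core_areas if area not in covered]
-- ===== Notes on version B (the rewrite author's own statement) =====
-- stated objective: idiomatic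
-- what changed: Replaces the per-area inner scan over required skills with a one-time inverted index skill->area; a single pass over current_skills collects the set of covered areas, and the result is the areas not covered, in dict order.
import Mathlib
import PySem

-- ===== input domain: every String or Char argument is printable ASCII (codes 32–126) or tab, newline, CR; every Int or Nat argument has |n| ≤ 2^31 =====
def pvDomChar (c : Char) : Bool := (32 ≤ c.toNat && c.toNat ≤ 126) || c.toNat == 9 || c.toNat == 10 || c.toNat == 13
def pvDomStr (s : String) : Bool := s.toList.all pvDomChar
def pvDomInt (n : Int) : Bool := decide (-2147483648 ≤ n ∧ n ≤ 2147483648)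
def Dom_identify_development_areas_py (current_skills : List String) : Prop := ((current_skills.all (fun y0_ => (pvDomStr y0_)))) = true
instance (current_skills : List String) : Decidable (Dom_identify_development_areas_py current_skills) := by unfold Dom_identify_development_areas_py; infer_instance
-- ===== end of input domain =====

-- B builds a one-time inverted index skill -> area and a single pass over current_skills
-- collects the covered areas; A scans each area's required-skill list against the skill set.

-- ===== PORT A =====
def pvCoreAreasA : List (String × List String) :=
  [("Technical", ["cloud", "aws", "azure", "python"]),
   ("Leadership", ["management", "leadership", "strategy"]),
   ("Domain", ["architecture", "security", "agile"])]

def identify_development_areas_py (current_skills : List String) : List String :=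
  let current_skills_lower : PySem.Set String :=
    PySem.Set.ofList (current_skills.map PySem.Str.lower)
  pvCoreAreasA.foldl (fun development_areas p =>
    if !(p.2.any (fun skill => PySem.Set.contains current_skills_lower skill)) then
      development_areas ++ [p.1]
    else development_areas) []

-- ===== PORT B =====
def pvCoreAreasB : List (String × List String) :=
  [("Technical", ["cloud", "aws", "azure", "python"]),
   ("Leadership", ["management", "leadership", "strategy"]),
   ("Domain", ["architecture", "security", "agile"])]

def pvSkillToArea : PySem.Dict String String :=
  pvCoreAreasB.foldl (fun d p => p.2.foldl (fun d skill => d.insert skill p.1) d) PySem.Dict.empty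

def identify_development_areas_py_alt (current_skills : List String) : List String :=
  let covered : PySem.Set String :=
    current_skills.foldl (fun cov skill =>
      match pvSkillToArea.get? (PySem.Str.lower skill) with
      | some area => PySem.Set.add cov area
      | none => cov) PySem.Set.empty
  (pvCoreAreasB.map Prod.fst).filter (fun area => !(PySem.Set.contains covered area))

-- ===== PRECONDITION & SPEC =====
def Spec_identify_development_areas_py (current_skills : List String) (out : List String) : Prop := out = identify_development_areas_py_alt current_skills
instance (current_skills : List String) (out : List String) : Decidable (Spec_identify_development_areas_py current_skills out) := by unfold Spec_identify_development_areas_py; infer_instance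

-- ===== CLAIM (what is proved, stated in full; the proofs are below) =====
def Claim_equal_identify_development_areas_py : Prop := ∀ (current_skills : List String), Dom_identify_development_areas_py current_skills → Spec_identify_development_areas_py current_skills (identify_development_areas_py current_skills)

-- ===== LEMMAS AND PROOFS =====

-- the built inverted index as a literal dict
theorem pvSkillToArea_eq : pvSkillToArea = PySem.Dict.mk
    [("cloud", "Technical"), ("aws", "Technical"), ("azure", "Technical"), ("python", "Technical"),
     ("management", "Leadership"), ("leadership", "Leadership"), ("strategy", "Leadership"),
     ("architecture", "Domain"), ("security", "Domain"), ("agile", "Domain")] := by decide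

-- lookup characterised per area
theorem pvGet?_tech (k : String) :
    pvSkillToArea.get? k = some "Technical" ↔ k ∈ (["cloud", "aws", "azure", "python"] : List String) := by
  rw [pvSkillToArea_eq]
  by_cases h0 : k = "cloud"
  · subst h0; decide
  by_cases h1 : k = "aws"
  · subst h1; decide
  by_cases h2 : k = "azure"
  · subst h2; decide
  by_cases h3 : k = "python"
  · subst h3; decide
  by_cases h4 : k = "management"
  · subst h4; decide
  by_cases h5 : k = "leadership"
  · subst h5; decide
  by_cases h6 : k = "strategy"
  · subst h6; decide
  by_cases h7 : k = "architecture"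
  · subst h7; decide
  by_cases h8 : k = "security"
  · subst h8; decide
  by_cases h9 : k = "agile"
  · subst h9; decide
  simp [PySem.Dict.get?_mk_cons, PySem.Dict.get?, h0, Ne.symm h0, h1, Ne.symm h1, h2, Ne.symm h2, h3, Ne.symm h3, h4, Ne.symm h4, h5, Ne.symm h5, h6, Ne.symm h6, h7, Ne.symm h7, h8, Ne.symm h8, h9, Ne.symm h9]

theorem pvGet?_lead (k : String) :
    pvSkillToArea.get? k = some "Leadership" ↔ k ∈ (["management", "leadership", "strategy"] : List String) := by
  rw [pvSkillToArea_eq]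
  by_cases h0 : k = "cloud"
  · subst h0; decide
  by_cases h1 : k = "aws"
  · subst h1; decide
  by_cases h2 : k = "azure"
  · subst h2; decide
  by_cases h3 : k = "python"
  · subst h3; decide
  by_cases h4 : k = "management"
  · subst h4; decide
  by_cases h5 : k = "leadership"
  · subst h5; decide
  by_cases h6 : k = "strategy"
  · subst h6; decide
  by_cases h7 : k = "architecture"
  · subst h7; decide
  by_cases h8 : k = "security"
  · subst h8; decide
  by_cases h9 : k = "agile"
  · subst h9; decide
  simp [PySem.Dict.get?_mk_cons, PySem.Dict.get?, h0, Ne.symm h0, h1, Ne.symm h1, h2, Ne.symm h2, h3, Ne.symm h3, h4, Ne.symm h4, h5, Ne.symm h5, h6, Ne.symm h6, h7, Ne.symm h7, h8, Ne.symm h8, h9, Ne.symm h9]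

theorem pvGet?_dom (k : String) :
    pvSkillToArea.get? k = some "Domain" ↔ k ∈ (["architecture", "security", "agile"] : List String) := by
  rw [pvSkillToArea_eq]
  by_cases h0 : k = "cloud"
  · subst h0; decide
  by_cases h1 : k = "aws"
  · subst h1; decide
  by_cases h2 : k = "azure"
  · subst h2; decide
  by_cases h3 : k = "python"
  · subst h3; decide
  by_cases h4 : k = "management"
  · subst h4; decide
  by_cases h5 : k = "leadership"
  · subst h5; decide
  by_cases h6 : k = "strategy"
  · subst h6; decide
  by_cases h7 : k = "architecture"
  · subst h7; decide
  by_cases h8 : k = "security"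
  · subst h8; decide
  by_cases h9 : k = "agile"
  · subst h9; decide
  simp [PySem.Dict.get?_mk_cons, PySem.Dict.get?, h0, Ne.symm h0, h1, Ne.symm h1, h2, Ne.symm h2, h3, Ne.symm h3, h4, Ne.symm h4, h5, Ne.symm h5, h6, Ne.symm h6, h7, Ne.symm h7, h8, Ne.symm h8, h9, Ne.symm h9]

-- membership in B's covered-set loop
theorem pvMem_covered (cs : List String) (cov : PySem.Set String) (a : String) :
    a ∈ cs.foldl (fun cov skill =>
        match pvSkillToArea.get? (PySem.Str.lower skill) with
        | some area => PySem.Set.add cov area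
        | none => cov) cov ↔
      a ∈ cov ∨ ∃ sk ∈ cs, pvSkillToArea.get? (PySem.Str.lower sk) = some a := by
  induction cs generalizing cov with
  | nil => simp
  | cons hd tl ih =>
    simp only [List.foldl_cons]
    cases h : pvSkillToArea.get? (PySem.Str.lower hd) with
    | none => rw [ih]; simp [h]
    | some area =>
      rw [ih]
      simp only [PySem.Set.mem_add, List.mem_cons]
      constructor
      · rintro ((h1 | rfl) | h1)
        · exact Or.inl h1
        · exact Or.inr ⟨hd, Or.inl rfl, h⟩
        · obtain ⟨sk, hsk, hget⟩ := h1; exact Or.inr ⟨sk, Or.inr hsk, hget⟩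
      · rintro (h1 | ⟨sk, (rfl | hsk), hget⟩)
        · exact Or.inl (Or.inl h1)
        · rw [h] at hget; exact Or.inl (Or.inr (Option.some.inj hget).symm)
        · exact Or.inr ⟨sk, hsk, hget⟩

-- covered.contains a agrees with A's per-area any-scan, for each area of the table
theorem pvCovered_eq (cs : List String) (a : String) (L : List String)
    (hL : ∀ k, pvSkillToArea.get? k = some a ↔ k ∈ L) :
    PySem.Set.contains
      (cs.foldl (fun cov skill =>
        match pvSkillToArea.get? (PySem.Str.lower skill) with
        | some area => PySem.Set.add cov area
        | none => cov) PySem.Set.empty) a =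
    L.any (fun skill =>
      PySem.Set.contains (PySem.Set.ofList (cs.map PySem.Str.lower)) skill) := by
  cases hb : L.any (fun skill =>
      PySem.Set.contains (PySem.Set.ofList (cs.map PySem.Str.lower)) skill) with
  | true =>
    rw [List.any_eq_true] at hb
    obtain ⟨skill, hmem, hc⟩ := hb
    rw [PySem.Set.contains_iff, PySem.Set.mem_ofList, List.mem_map] at hc
    obtain ⟨sk, hsk, rfl⟩ := hc
    rw [PySem.Set.contains_iff, pvMem_covered]
    exact Or.inr ⟨sk, hsk, (hL _).2 hmem⟩
  | false =>
    rw [List.any_eq_false] at hb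
    rw [← Bool.not_eq_true, PySem.Set.contains_iff, pvMem_covered]
    rintro (h | ⟨sk, hsk, hget⟩)
    · simp [PySem.Set.empty] at h
    · have hmem := (hL _).1 hget
      refine hb _ hmem ?_
      rw [PySem.Set.contains_iff, PySem.Set.mem_ofList, List.mem_map]
      exact ⟨sk, hsk, rfl⟩

-- ===== VERDICT (by name: the statement is the Claim_ definition above) =====
theorem identify_development_areas_py_spec : Claim_equal_identify_development_areas_py := by
  intro cs _
  unfold Spec_identify_development_areas_py identify_development_areas_py identify_development_areas_py_alt
  have hT := pvCovered_eq cs "Technical" ["cloud", "aws", "azure", "python"] pvGet?_tech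
  have hL := pvCovered_eq cs "Leadership" ["management", "leadership", "strategy"] pvGet?_lead
  have hD := pvCovered_eq cs "Domain" ["architecture", "security", "agile"] pvGet?_dom
  simp only [pvCoreAreasA, pvCoreAreasB, List.foldl_cons, List.foldl_nil,
    List.map_cons, List.map_nil, List.filter_cons, List.filter_nil, hT, hL, hD]
  split_ifs <;> simp_all
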